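-- pv_equiv track=rewrite | github.com/siowyisheng/python-problem-solving | unsolved/game_of_life.py | stringify
-- ===== SOURCE A (Python) =====
-- def get_width_height(board):
--     x_coords = [cell[0] for cell in board]
--     y_coords = [cell[1] for cell in board]
--     width = max(x_coords) - min(x_coords) + 1
--     height = max(y_coords) - min(y_coords) + 1
--     return width, height
--
-- def stringify(board):
--     width, height = get_width_height(board)
--     s = ''
--     for j in range(height):
--         line = ''
--         for i in range(width):
--             if (i, j) in board:
--                 line += '*'
--             else:
--                 line += '.'
--         s = '\n' + line + s
--     s = s[1:]
--     return s
-- ===== SOURCE B (Python) =====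
-- def get_width_height(board):
--     x_coords = [cell[0] for cell in board]
--     y_coords = [cell[1] for cell in board]
--     width = max(x_coords) - min(x_coords) + 1
--     height = max(y_coords) - min(y_coords) + 1
--     return width, height
--
-- def stringify(board):
--     width, height = get_width_height(board)
--     grid = [['.'] * width for _ in range(height)]
--     for cell in board:
--         x, y = cell[0], cell[1]
--         if 0 <= x < width and 0 <= y < height:
--             grid[y][x] = '*'
--     return '\n'.join(''.join(row) for row in reversed(grid))
-- ===== Notes on version B (the rewrite author's own statement) =====
-- stated objective: faster
-- what changed: Instead of testing membership of every (i,j) of the width x height box in the board, B allocates a grid of '.' rows once, scatters each live in-bounds cell into it in a single pass over the board, and joins the rows in reverse order.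
import Mathlib
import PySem

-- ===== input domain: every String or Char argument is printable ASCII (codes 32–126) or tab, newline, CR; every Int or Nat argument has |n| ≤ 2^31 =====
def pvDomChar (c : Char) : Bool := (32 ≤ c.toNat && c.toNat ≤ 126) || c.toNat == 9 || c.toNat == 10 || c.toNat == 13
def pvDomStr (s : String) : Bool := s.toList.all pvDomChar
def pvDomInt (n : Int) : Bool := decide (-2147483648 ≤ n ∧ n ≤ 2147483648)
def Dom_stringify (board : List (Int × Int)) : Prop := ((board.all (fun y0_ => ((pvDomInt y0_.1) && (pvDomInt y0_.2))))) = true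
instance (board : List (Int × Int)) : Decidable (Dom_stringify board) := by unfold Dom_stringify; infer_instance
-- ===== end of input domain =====

-- B replaces A's width×height membership scan by one bounds-checked scatter of the
-- live cells into a prebuilt grid of dots, then joins the rows bottom-up ('alternative'
-- decomposition; asymptotically fewer membership tests).

-- ===== PORT A =====
def stringify (board : List (Int × Int)) : String :=
  let x_coords := board.map (fun cell => cell.1)
  let y_coords := board.map (fun cell => cell.2)
  match PySem.List.max? x_coords (fun v => v), PySem.List.min? x_coords (fun v => v),
        PySem.List.max? y_coords (fun v => v), PySem.List.min? y_coords (fun v => v) with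
  | some maxX, some minX, some maxY, some minY =>
      let width := maxX - minX + 1
      let height := maxY - minY + 1
      let s : List Char := (PySem.List.pyRange 0 height 1).foldl (fun s j =>
        let line : List Char := (PySem.List.pyRange 0 width 1).foldl (fun line i =>
          line ++ (if board.contains (i, j) then ['*'] else ['.'])) []
        '\n' :: line ++ s) []
      String.ofList (PySem.List.slice s (some 1) none)
  | _, _, _, _ => ""  -- max() of an empty sequence raises ValueError: excluded by Pre_

-- ===== PORT B =====
def stringify_alt (board : List (Int × Int)) : String :=
  let x_coords := board.map (fun cell => cell.1)
  let y_coords := board.map (fun cell => cell.2)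
  -- same get_width_height as in Source B; the empty board (max() ValueError) is outside Pre_
  match PySem.List.max? x_coords (fun v => v) with
  | none => ""
  | some maxX =>
  match PySem.List.min? x_coords (fun v => v) with
  | none => ""
  | some minX =>
  match PySem.List.max? y_coords (fun v => v) with
  | none => ""
  | some maxY =>
  match PySem.List.min? y_coords (fun v => v) with
  | none => ""
  | some minY =>
      let width := maxX - minX + 1
      let height := maxY - minY + 1
      let grid : List (List Char) :=
        List.replicate height.toNat (List.replicate width.toNat '.')
      let grid := board.foldl (fun g cell =>
        if 0 ≤ cell.1 ∧ cell.1 < width ∧ 0 ≤ cell.2 ∧ cell.2 < height then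
          g.set cell.2.toNat ((g[cell.2.toNat]?.getD []).set cell.1.toNat '*')
        else g) grid
      String.ofList (PySem.Chars.join ['\n'] grid.reverse)

-- ===== PRECONDITION & SPEC =====
-- Pre_ excludes only the empty board, on which A's max() raises ValueError.
def Pre_stringify (board : List (Int × Int)) : Prop := board ≠ []
instance (board : List (Int × Int)) : Decidable (Pre_stringify board) := by
  unfold Pre_stringify; infer_instance
def pvWitness_stringify : (List (Int × Int)) := [(0, 0), (1, 1)]
def Spec_stringify (board : List (Int × Int)) (out : String) : Prop := out = stringify_alt board
instance (board : List (Int × Int)) (out : String) : Decidable (Spec_stringify board out) := by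
  unfold Spec_stringify; infer_instance

-- ===== CLAIM (what is proved, stated in full; the proofs are below) =====
def Claim_equal_stringify : Prop := ∀ (board : List (Int × Int)), Dom_stringify board → Pre_stringify board → Spec_stringify board (stringify board)

-- ===== LEMMAS AND PROOFS =====

/-- Grid of characters given pointwise by `f` (helper for the proofs only). -/
def pvGrid (w h : Nat) (f : Nat → Nat → Char) : List (List Char) :=
  (List.range h).map (fun j => (List.range w).map (f j))

theorem pvGrid_congr {w h : Nat} {f f' : Nat → Nat → Char}
    (hf : ∀ j < h, ∀ i < w, f j i = f' j i) : pvGrid w h f = pvGrid w h f' := by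
  unfold pvGrid
  refine List.map_congr_left (fun j hj => ?_)
  refine List.map_congr_left (fun i hi => ?_)
  exact hf j (List.mem_range.mp hj) i (List.mem_range.mp hi)

theorem pv_row_set (w x : Nat) (_hx : x < w) (g : Nat → Char) :
    ((List.range w).map g).set x '*'
      = (List.range w).map (fun i => if i = x then '*' else g i) := by
  apply List.ext_getElem
  · simp
  · intro i h1 h2
    simp only [List.getElem_set, List.getElem_map, List.getElem_range]
    simp only [List.length_set, List.length_map, List.length_range] at h1
    split_ifs with h h' <;> first | rfl | omega

theorem pv_grid_set (w h x y : Nat) (hx : x < w) (hy : y < h) (f : Nat → Nat → Char) :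
    (pvGrid w h f).set y (((pvGrid w h f)[y]?.getD []).set x '*')
      = pvGrid w h (fun j i => if j = y ∧ i = x then '*' else f j i) := by
  have hrow : (pvGrid w h f)[y]? = some ((List.range w).map (f y)) := by
    simp [pvGrid, hy]
  rw [hrow]
  simp only [Option.getD_some]
  rw [pv_row_set w x hx]
  apply List.ext_getElem
  · simp [pvGrid]
  · intro j h1 h2
    simp only [List.length_set] at h1
    simp only [pvGrid, List.length_map, List.length_range] at h1 h2 ⊢
    simp only [List.getElem_set, List.getElem_map, List.getElem_range]
    split_ifs with h
    · subst h
      refine List.map_congr_left (fun i hi => ?_)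
      simp
    · refine List.map_congr_left (fun i hi => ?_)
      simp [Ne.symm h]

theorem pv_scatter (w h : Int) :
    ∀ (bs : List (Int × Int)) (f : Nat → Nat → Char),
      bs.foldl (fun g cell =>
        if 0 ≤ cell.1 ∧ cell.1 < w ∧ 0 ≤ cell.2 ∧ cell.2 < h then
          g.set cell.2.toNat ((g[cell.2.toNat]?.getD []).set cell.1.toNat '*')
        else g) (pvGrid w.toNat h.toNat f)
      = pvGrid w.toNat h.toNat (fun j i =>
          if ((i : Int), (j : Int)) ∈ bs then '*' else f j i) := by
  intro bs
  induction bs with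
  | nil => intro f; simp
  | cons c rest ih =>
    intro f
    simp only [List.foldl_cons]
    by_cases hc : 0 ≤ c.1 ∧ c.1 < w ∧ 0 ≤ c.2 ∧ c.2 < h
    · rw [if_pos hc,
        pv_grid_set w.toNat h.toNat c.1.toNat c.2.toNat (by omega) (by omega) f, ih]
      apply pvGrid_congr
      intro j hj i hi
      by_cases hm : ((i : Int), (j : Int)) ∈ rest
      · simp [hm, List.mem_cons]
      · by_cases he : ((i : Int), (j : Int)) = c
        · have hij : j = c.2.toNat ∧ i = c.1.toNat := by
            obtain ⟨h1, h2⟩ := Prod.mk.injEq .. ▸ he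
            omega
          rw [if_neg hm, if_pos hij, if_pos (by simp [List.mem_cons, he])]
        · have hij : ¬(j = c.2.toNat ∧ i = c.1.toNat) := by
            intro ⟨h1, h2⟩
            apply he
            have e1 : (i : Int) = c.1 := by omega
            have e2 : (j : Int) = c.2 := by omega
            simp [e1, e2]
          rw [if_neg hm, if_neg hij, if_neg (by simp [List.mem_cons, he, hm])]
    · rw [if_neg hc, ih]
      apply pvGrid_congr
      intro j hj i hi
      have he : ¬((i : Int), (j : Int)) = c := by
        intro h
        apply hc
        obtain ⟨h1, h2⟩ := Prod.mk.injEq .. ▸ h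
        omega
      simp [List.mem_cons, he]

theorem pv_revjoin (L : Int → List Char) :
    ∀ (js : List Int) (s : List Char),
      js.foldl (fun s j => '\n' :: L j ++ s) s
        = (js.reverse.map (fun j => '\n' :: L j)).flatten ++ s := by
  intro js
  induction js with
  | nil => intro s; simp
  | cons j t ih =>
    intro s
    rw [List.foldl_cons, ih]
    simp

theorem pv_join_aux :
    ∀ (t : List (List Char)) (r : List Char),
      r ++ ((t.map (fun x => '\n' :: x)).flatten) = PySem.Chars.join ['\n'] (r :: t) := by
  intro t
  induction t with
  | nil => intro r; simp [PySem.Chars.join_singleton]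
  | cons r' t' ih =>
    intro r
    rw [PySem.Chars.join_cons_cons]
    simp only [List.map_cons, List.flatten_cons]
    rw [← ih r']
    simp

theorem pv_tail_join (l : List (List Char)) :
    ((l.map (fun r => '\n' :: r)).flatten).tail = PySem.Chars.join ['\n'] l := by
  cases l with
  | nil => simp [PySem.Chars.join_nil]
  | cons r t =>
    simp only [List.map_cons, List.flatten_cons, List.cons_append, List.tail_cons]
    exact pv_join_aux t r

-- ===== VERDICT (by name: the statement is the Claim_ definition above) =====
theorem pvGrid_const (w h : Nat) (c : Char) :
    List.replicate h (List.replicate w c) = pvGrid w h (fun _ _ => c) := by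
  simp [pvGrid]

theorem stringify_spec : Claim_equal_stringify := by
  intro board _dom hpre
  unfold Spec_stringify stringify stringify_alt
  obtain ⟨mxX, hmxX⟩ : ∃ v, PySem.List.max? (board.map (fun cell => cell.1)) (fun v => v) = some v := by
    cases hc : PySem.List.max? (board.map (fun cell => cell.1)) (fun v => v) with
    | none => exact absurd (by simpa using (PySem.List.max?_eq_none_iff _ _).mp hc) hpre
    | some v => exact ⟨v, rfl⟩
  obtain ⟨mnX, hmnX⟩ : ∃ v, PySem.List.min? (board.map (fun cell => cell.1)) (fun v => v) = some v := by
    cases hc : PySem.List.min? (board.map (fun cell => cell.1)) (fun v => v) with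
    | none => exact absurd (by simpa using (PySem.List.min?_eq_none_iff _ _).mp hc) hpre
    | some v => exact ⟨v, rfl⟩
  obtain ⟨mxY, hmxY⟩ : ∃ v, PySem.List.max? (board.map (fun cell => cell.2)) (fun v => v) = some v := by
    cases hc : PySem.List.max? (board.map (fun cell => cell.2)) (fun v => v) with
    | none => exact absurd (by simpa using (PySem.List.max?_eq_none_iff _ _).mp hc) hpre
    | some v => exact ⟨v, rfl⟩
  obtain ⟨mnY, hmnY⟩ : ∃ v, PySem.List.min? (board.map (fun cell => cell.2)) (fun v => v) = some v := by
    cases hc : PySem.List.min? (board.map (fun cell => cell.2)) (fun v => v) with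
    | none => exact absurd (by simpa using (PySem.List.min?_eq_none_iff _ _).mp hc) hpre
    | some v => exact ⟨v, rfl⟩
  simp only [hmxX, hmnX, hmxY, hmnY]
  rw [pvGrid_const, pv_scatter (mxX - mnX + 1) (mxY - mnY + 1) board]
  rw [pv_revjoin, List.append_nil, PySem.List.slice_from_one]
  rw [show (fun j => '\n' :: List.foldl (fun line i => line ++ if board.contains (i, j) = true then ['*'] else ['.']) []
          (PySem.List.pyRange 0 (mxX - mnX + 1)))
      = ((fun r => '\n' :: r) ∘ (fun j => List.foldl (fun line i => line ++ if board.contains (i, j) = true then ['*'] else ['.']) []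
          (PySem.List.pyRange 0 (mxX - mnX + 1)))) from rfl, ← List.map_map]
  rw [pv_tail_join]
  congr 1
  rw [List.map_reverse]
  congr 1
  simp only [PySem.List.pyRange_one, Int.sub_zero, List.map_map, pvGrid]
  congr 1
  apply List.map_congr_left
  intro k hk
  simp only [Function.comp_apply, Int.zero_add]
  rw [show (fun (line : List Char) (i : Int) => line ++ if board.contains (i, (k : Int)) = true then ['*'] else ['.'])
      = (fun (line : List Char) (i : Int) => line ++ [if board.contains (i, (k : Int)) = true then '*' else '.']) from by
        funext line i; congr 1; split <;> rfl]
  rw [PySem.List.foldl_append_singleton_eq_map, List.nil_append]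
  simp only [List.map_map]
  apply List.map_congr_left
  intro i hi
  simp
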